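-- pv_equiv track=rewrite | github.com/python-coding-test/cote0505 | 14주차/5번문제/최준호.py | solution
-- ===== SOURCE A (Python) =====
-- from collections import deque
-- from bisect import bisect_right
--
-- def solution(scores):
--     answer = 0
--
--     target = scores[0]
--     # q = deque(sorted(scores,reverse=True))
--     scores.sort(key=lambda x: (-x[0], x[1]))
--     q = deque(scores)
--     peerScore = q[0][1]
--     for _ in range(len(q)):
--         i = q.popleft()
--         if i[1] < peerScore:
--             if i == target:
--                 return -1
--             continue
--         elif i[1] > peerScore:
--             peerScore = i[1]
--         q.append(sum(i))
--
--     score = len(q) - bisect_right(sorted(q),sum(target)) + 1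
--
--     return score
-- ===== SOURCE B (Python) =====
-- def solution(scores):
--     target = scores[0]
--
--     def dominated(i):
--         return any(j[0] > i[0] and j[1] > i[1] for j in scores)
--
--     if dominated(target):
--         return -1
--     t = sum(target)
--     return 1 + sum(1 for i in scores if not dominated(i) and sum(i) > t)
-- ===== Notes on version B (the rewrite author's own statement) =====
-- stated objective: simpler
-- what changed: B drops A's sort, dominance sweep with a running max, deque of sums, second sort and bisect entirely: it tests dominance of each element by a direct pairwise scan and computes the rank as 1 + the count of non-dominated elements whose score sum exceeds the target's.
import Mathlib
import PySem

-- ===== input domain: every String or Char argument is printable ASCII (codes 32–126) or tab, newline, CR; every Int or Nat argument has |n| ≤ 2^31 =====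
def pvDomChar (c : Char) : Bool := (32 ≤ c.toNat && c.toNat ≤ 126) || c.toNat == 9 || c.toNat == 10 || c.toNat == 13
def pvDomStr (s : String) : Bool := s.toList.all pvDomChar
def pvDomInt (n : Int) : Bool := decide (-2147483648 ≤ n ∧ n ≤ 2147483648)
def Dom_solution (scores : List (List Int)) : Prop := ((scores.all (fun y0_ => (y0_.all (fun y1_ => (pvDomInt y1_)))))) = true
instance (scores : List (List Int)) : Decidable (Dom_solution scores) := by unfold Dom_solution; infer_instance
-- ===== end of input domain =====

-- B replaces A's sort + running-max sweep + deque of sums + bisect by a direct pairwise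
-- dominance test and a linear count (objective: simpler). A sorts the argument list in
-- place in Python; B does not mutate it — the equivalence proved here is about the
-- RETURN value only.

-- ===== PORT A =====
-- A's dominance-filter loop: pops each element, returns none for Python's early
-- 'return -1', otherwise the list of survivor sums appended in order
def solveLoopA (target : List Int) : List (List Int) → Int → List Int → Option (List Int)
  | [], _, acc => some acc
  | i :: rest, peer, acc =>
    if PySem.List.pyGetD i 1 0 < peer then
      if i = target then none else solveLoopA target rest peer acc
    else if PySem.List.pyGetD i 1 0 > peer then
      solveLoopA target rest (PySem.List.pyGetD i 1 0) (acc ++ [i.sum])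
    else
      solveLoopA target rest peer (acc ++ [i.sum])

def solution (scores : List (List Int)) : Int :=
  let target := scores.headD []                                   -- scores[0]; Pre_ excludes []
  let ss := PySem.List.sorted2 scores (fun x => -(PySem.List.pyGetD x 0 0)) (fun x => PySem.List.pyGetD x 1 0)
  let peerScore := PySem.List.pyGetD (ss.headD []) 1 0            -- q[0][1]
  match solveLoopA target ss peerScore [] with
  | none => -1
  | some q =>
      (q.length : Int) - (PySem.List.bisectRight (PySem.List.sorted q (fun x => x)) target.sum : Int) + 1

-- ===== PORT B =====
-- B's pairwise dominance test: any(j[0] > i[0] and j[1] > i[1] for j in scores)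
def dominatedB (scores : List (List Int)) (i : List Int) : Bool :=
  scores.any (fun j =>
    decide (PySem.List.pyGetD i 0 0 < PySem.List.pyGetD j 0 0) &&
    decide (PySem.List.pyGetD i 1 0 < PySem.List.pyGetD j 1 0))

def solution_alt (scores : List (List Int)) : Int :=
  let target := scores.headD []
  if dominatedB scores target then -1
  else
    let t := target.sum
    1 + (scores.countP (fun i => !dominatedB scores i && decide (t < i.sum)) : Int)

-- ===== PRECONDITION & SPEC =====
-- Pre_ excludes exactly the inputs where Python A raises: an empty list (scores[0] → IndexError)
-- and inner lists of length < 2 (x[1] in the sort key / loop → IndexError)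
def Pre_solution (scores : List (List Int)) : Prop :=
  scores ≠ [] ∧ ∀ l ∈ scores, 2 ≤ l.length
instance (scores : List (List Int)) : Decidable (Pre_solution scores) := by unfold Pre_solution; infer_instance
def pvWitness_solution : List (List Int) := [[2, 2], [1, 4], [3, 3]]

def Spec_solution (scores : List (List Int)) (out : Int) : Prop := out = solution_alt scores
instance (scores : List (List Int)) (out : Int) : Decidable (Spec_solution scores out) := by unfold Spec_solution; infer_instance

-- ===== CLAIM (what is proved, stated in full; the proofs are below) =====
def Claim_equal_solution : Prop := ∀ (scores : List (List Int)), Dom_solution scores → Pre_solution scores → Spec_solution scores (solution scores)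

-- ===== LEMMAS AND PROOFS =====

-- projections used throughout the proofs
def sc0 (i : List Int) : Int := PySem.List.pyGetD i 0 0
def sc1 (i : List Int) : Int := PySem.List.pyGetD i 1 0

-- A's sort key as a lexicographic pair
def keyA (i : List Int) : Lex (Int × Int) := toLex (-(sc0 i), sc1 i)

-- A's in-place sort is sorting by the lexicographic key keyA
theorem sorted2_eq_lex (xs : List (List Int)) :
    PySem.List.sorted2 xs (fun x => -(PySem.List.pyGetD x 0 0)) (fun x => PySem.List.pyGetD x 1 0)
      = PySem.List.sorted xs keyA := by
  have hb : (fun (a b : List (Int)) =>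
        decide (-(PySem.List.pyGetD a 0 0) < -(PySem.List.pyGetD b 0 0)) ||
          (!decide (-(PySem.List.pyGetD b 0 0) < -(PySem.List.pyGetD a 0 0)) &&
            decide (PySem.List.pyGetD a 1 0 < PySem.List.pyGetD b 1 0)))
      = (fun (a b : List Int) => decide (keyA a < keyA b)) := by
    funext a b
    by_cases h1 : -(PySem.List.pyGetD a 0 0) < -(PySem.List.pyGetD b 0 0)
    · simp [keyA, sc0, sc1, Prod.Lex.toLex_lt_toLex, h1, asymm h1]
    · by_cases h2 : -(PySem.List.pyGetD b 0 0) < -(PySem.List.pyGetD a 0 0)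
      · have h3 : ¬ (-(PySem.List.pyGetD a 0 0) = -(PySem.List.pyGetD b 0 0)) := by omega
        simp [keyA, sc0, sc1, Prod.Lex.toLex_lt_toLex, h1, h2, h3]
      · have h3 : -(PySem.List.pyGetD a 0 0) = -(PySem.List.pyGetD b 0 0) := by omega
        simp [keyA, sc0, sc1, Prod.Lex.toLex_lt_toLex, h1, h2, h3]
  show List.foldl (fun acc x => PySem.List.insertBy (fun a b =>
        decide (-(PySem.List.pyGetD a 0 0) < -(PySem.List.pyGetD b 0 0)) ||
          (!decide (-(PySem.List.pyGetD b 0 0) < -(PySem.List.pyGetD a 0 0)) &&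
            decide (PySem.List.pyGetD a 1 0 < PySem.List.pyGetD b 1 0))) x acc) [] xs
      = List.foldl (fun acc x => PySem.List.insertBy
          (fun a b => decide (keyA a < keyA b)) x acc) [] xs
  rw [hb]

theorem dominatedB_iff (scores : List (List Int)) (i : List Int) :
    dominatedB scores i = true ↔ ∃ j ∈ scores, sc0 i < sc0 j ∧ sc1 i < sc1 j := by
  simp [dominatedB, sc0, sc1, List.any_eq_true]

-- A's loop with accumulator acc is acc ++ (the loop started empty)
theorem solveLoopA_acc (target : List Int) (rest : List (List Int)) (peer : Int) (acc : List Int) :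
    solveLoopA target rest peer acc = (solveLoopA target rest peer []).map (fun s => acc ++ s) := by
  induction rest generalizing peer acc with
  | nil => simp [solveLoopA]
  | cons i rest ih =>
    simp only [solveLoopA]
    split_ifs with h1 h2 h3
    · rfl
    · exact ih peer acc
    · rw [ih _ (acc ++ [i.sum]), ih _ ([] ++ [i.sum])]
      simp [Option.map_map, Function.comp_def]
    · rw [ih _ (acc ++ [i.sum]), ih _ ([] ++ [i.sum])]
      simp [Option.map_map, Function.comp_def]

-- the heart of the equivalence: on the keyA-sorted list, A's running-max sweep
-- detects exactly the pairwise-dominated elements, and its survivor sums are the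
-- sums of the non-dominated elements
theorem loopA_char (scores : List (List Int)) (target : List Int) :
    ∀ (rest pre : List (List Int)) (P : Int),
      (pre ++ rest).Pairwise (fun a b => keyA a ≤ keyA b) →
      (pre ++ rest).Perm scores →
      (∀ j ∈ pre, sc1 j ≤ P) →
      ((∀ i ∈ rest.head?, P ≤ sc1 i) ∨ (∃ j ∈ pre, P ≤ sc1 j)) →
      solveLoopA target rest P [] =
        if rest.any (fun i => decide (i = target) && dominatedB scores i) then none
        else some ((rest.filter (fun i => !dominatedB scores i)).map List.sum)
  | [], pre, P, _, _, _, _ => by simp [solveLoopA]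
  | i :: rest', pre, P, hsort, hperm, hub, hat => by
    have hsort' : (pre ++ [i] ++ rest').Pairwise (fun a b => keyA a ≤ keyA b) := by
      simpa using hsort
    have hperm' : (pre ++ [i] ++ rest').Perm scores := by simpa using hperm
    have hpair := List.pairwise_append.mp hsort
    have hkey : sc1 i < P ↔ dominatedB scores i = true := by
      constructor
      · intro h
        rcases hat with hH | ⟨j, hj, hPj⟩
        · exact absurd (hH i rfl) (not_le.mpr h)
        · have hji : keyA j ≤ keyA i := hpair.2.2 j hj i (List.mem_cons_self)
          rw [keyA, keyA, Prod.Lex.toLex_le_toLex] at hji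
          have h1 : sc1 i < sc1 j := lt_of_lt_of_le h hPj
          rcases hji with h0 | ⟨_, h2⟩
          · exact (dominatedB_iff scores i).mpr ⟨j, hperm.subset (by simp [hj]), by omega, h1⟩
          · omega
      · intro hdom
        obtain ⟨j, hjs, h0, h1⟩ := (dominatedB_iff scores i).mp hdom
        have hj : j ∈ pre ++ i :: rest' := hperm.mem_iff.mpr hjs
        rcases List.mem_append.mp hj with hj | hj
        · exact lt_of_lt_of_le h1 (hub j hj)
        · rcases List.mem_cons.mp hj with rfl | hj
          · omega
          · have hij : keyA i ≤ keyA j := (List.pairwise_cons.mp hpair.2.1).1 j hj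
            rw [keyA, keyA, Prod.Lex.toLex_le_toLex] at hij
            rcases hij with h' | ⟨h', _⟩ <;> omega
    simp only [solveLoopA]
    by_cases hlt : PySem.List.pyGetD i 1 0 < P
    · have hdom : dominatedB scores i = true := hkey.mp hlt
      rw [if_pos hlt]
      by_cases hit : i = target
      · subst hit
        simp [hdom]
      · rw [if_neg hit]
        rw [loopA_char scores target rest' (pre ++ [i]) P hsort' hperm'
              (by intro j hj; rcases List.mem_append.mp hj with hj | hj
                  · exact hub j hj
                  · simp at hj; subst hj; exact le_of_lt hlt)
              (by right
                  rcases hat with hH | ⟨j, hj, hPj⟩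
                  · exact absurd (hH i rfl) (not_le.mpr hlt)
                  · exact ⟨j, by simp [hj], hPj⟩)]
        simp [hit, hdom]
    · have hdom : dominatedB scores i = false := by
        rcases Bool.eq_false_or_eq_true (dominatedB scores i) with h | h
        · exact absurd (hkey.mpr h) hlt
        · exact h
      rw [if_neg hlt]
      have hPle : P ≤ sc1 i := not_lt.mp hlt
      have hrec : ∀ P', sc1 i ≤ P' → P' ≤ sc1 i → (∀ j ∈ pre, sc1 j ≤ P') →
          solveLoopA target rest' P' ([] ++ [i.sum]) =
            if rest'.any (fun x => decide (x = target) && dominatedB scores x) then none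
            else some (i.sum :: (rest'.filter (fun x => !dominatedB scores x)).map List.sum) := by
        intro P' h1 h1' h2
        rw [solveLoopA_acc]
        rw [loopA_char scores target rest' (pre ++ [i]) P' hsort' hperm'
              (by intro j hj
                  rcases List.mem_append.mp hj with hj | hj
                  · exact h2 j hj
                  · simp at hj; subst hj; exact h1)
              (Or.inr ⟨i, by simp, h1'⟩)]
        by_cases h : rest'.any (fun x => decide (x = target) && dominatedB scores x) = true <;>
          simp [h]
      have hRHS :
          (if (i :: rest').any (fun x => decide (x = target) && dominatedB scores x) then none
           else some (((i :: rest').filter (fun x => !dominatedB scores x)).map List.sum)) =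
          (if rest'.any (fun x => decide (x = target) && dominatedB scores x) then none
           else some (i.sum :: (rest'.filter (fun x => !dominatedB scores x)).map List.sum)) := by
        simp [List.any_cons, hdom]
      rw [hRHS]
      by_cases hgt : PySem.List.pyGetD i 1 0 > P
      · rw [if_pos hgt]
        exact hrec (PySem.List.pyGetD i 1 0) le_rfl le_rfl
          (fun j hj => le_trans (hub j hj) (le_of_lt hgt))
      · rw [if_neg hgt]
        exact hrec P (not_lt.mp hgt) hPle hub

-- on a ≤-sorted list, length - bisect_right t = number of elements > t
theorem bisect_count (s : List Int) (t : Int) (h : s.Pairwise (· ≤ ·)) :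
    s.countP (fun x => decide (t < x)) = s.length - PySem.List.bisectRight s t := by
  obtain ⟨hle, hlo, hhi⟩ := PySem.List.bisectRight_spec s t h
  set k := PySem.List.bisectRight s t with hk
  have hsplit : s.take k ++ s.drop k = s := List.take_append_drop k s
  have h1 : (s.take k).countP (fun x => decide (t < x)) = 0 := by
    rw [List.countP_eq_zero]
    intro x hx
    obtain ⟨i, hi, hxi⟩ := List.mem_iff_getElem.mp hx
    have hik : i < k := lt_of_lt_of_le hi (by simp)
    have hilen : i < s.length := lt_of_lt_of_le hik hle
    have := hlo i hilen hik
    rw [List.getElem_take] at hxi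
    simp [← hxi]
    omega
  have h2 : (s.drop k).countP (fun x => decide (t < x)) = (s.drop k).length := by
    rw [List.countP_eq_length]
    intro x hx
    obtain ⟨i, hi, hxi⟩ := List.mem_iff_getElem.mp hx
    rw [List.getElem_drop] at hxi
    have hilen : k + i < s.length := by simp at hi; omega
    have := hhi (k + i) hilen (Nat.le_add_right k i)
    simp [← hxi]
    omega
  calc s.countP (fun x => decide (t < x))
      = (s.take k ++ s.drop k).countP (fun x => decide (t < x)) := by rw [hsplit]
    _ = s.length - k := by
        rw [List.countP_append, h1, h2, List.length_drop]
        omega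

-- ===== VERDICT (by name: the statement is the Claim_ definition above) =====
theorem solution_spec : Claim_equal_solution := by
  intro scores _ hpre
  obtain ⟨hne, -⟩ := hpre
  unfold Spec_solution solution solution_alt
  rw [sorted2_eq_lex]
  have htmem : scores.headD [] ∈ scores := by
    cases scores with
    | nil => exact absurd rfl hne
    | cons a l => exact List.mem_cons_self
  have hperm : (PySem.List.sorted scores keyA).Perm scores := PySem.List.sorted_perm scores keyA false
  have hpairA : (PySem.List.sorted scores keyA).Pairwise (fun a b => keyA a ≤ keyA b) :=
    PySem.List.sorted_pairwise scores keyA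
  have htss : scores.headD [] ∈ PySem.List.sorted scores keyA := hperm.mem_iff.mpr htmem
  have hhead : ∀ j ∈ (PySem.List.sorted scores keyA).head?,
      PySem.List.pyGetD ((PySem.List.sorted scores keyA).headD []) 1 0 ≤ sc1 j := by
    cases h : (PySem.List.sorted scores keyA).head? with
    | none => intro j hj; simp at hj
    | some a =>
      intro j hj
      simp only [Option.mem_def, Option.some.injEq] at hj
      subst hj
      rw [List.headD_eq_head?_getD, h]
      exact le_rfl
  have hchar := loopA_char scores (scores.headD []) (PySem.List.sorted scores keyA) []
      (PySem.List.pyGetD ((PySem.List.sorted scores keyA).headD []) 1 0)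
      (by simpa using hpairA) (by simpa using hperm) (by simp) (Or.inl hhead)
  have hany : (PySem.List.sorted scores keyA).any
      (fun i => decide (i = scores.headD []) && dominatedB scores i)
      = dominatedB scores (scores.headD []) := by
    cases hd : dominatedB scores (scores.headD []) with
    | true =>
      rw [List.any_eq_true]
      exact ⟨scores.headD [], htss, by simp [← List.headD_eq_head?_getD, hd]⟩
    | false =>
      rw [List.any_eq_false]
      intro x hx
      by_cases hxt : x = scores.headD []
      · subst hxt; simp [← List.headD_eq_head?_getD, hd]
      · simp [← List.headD_eq_head?_getD, hxt]
  rw [hany] at hchar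
  show (match solveLoopA (scores.headD []) (PySem.List.sorted scores keyA)
      (PySem.List.pyGetD ((PySem.List.sorted scores keyA).headD []) 1 0) [] with
    | none => (-1 : Int)
    | some q => (q.length : Int) -
        (PySem.List.bisectRight (PySem.List.sorted q (fun x => x)) (scores.headD []).sum : Int) + 1)
    = if dominatedB scores (scores.headD []) = true then -1
      else 1 + (scores.countP
          (fun i => !dominatedB scores i && decide ((scores.headD []).sum < i.sum)) : Int)
  rw [hchar]
  cases hd : dominatedB scores (scores.headD []) with
  | true => simp [hd]
  | false =>
    simp only [Bool.false_eq_true, if_false]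
    set q : List Int := (((PySem.List.sorted scores keyA).filter
        (fun i => !dominatedB scores i)).map List.sum) with hq
    have hpairq : (PySem.List.sorted q (fun x => x)).Pairwise (· ≤ ·) := by
      simpa using PySem.List.sorted_pairwise q (fun x => x)
    have hpq : (PySem.List.sorted q (fun x => x)).Perm q := PySem.List.sorted_perm q (fun x => x) false
    have hcnt := bisect_count (PySem.List.sorted q (fun x => x)) (scores.headD []).sum hpairq
    have hccnt : (PySem.List.sorted q (fun x => x)).countP
        (fun x => decide ((scores.headD []).sum < x)) =
        q.countP (fun x => decide ((scores.headD []).sum < x)) := hpq.countP_eq _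
    have hlen : (PySem.List.sorted q (fun x => x)).length = q.length := hpq.length_eq
    have hble : PySem.List.bisectRight (PySem.List.sorted q (fun x => x)) (scores.headD []).sum
        ≤ q.length := by
      have := (PySem.List.bisectRight_spec (PySem.List.sorted q (fun x => x))
        (scores.headD []).sum hpairq).1
      omega
    have hqcount : q.countP (fun x => decide ((scores.headD []).sum < x)) =
        scores.countP (fun i => !dominatedB scores i && decide ((scores.headD []).sum < i.sum)) := by
      rw [hq, List.countP_map, List.countP_filter, ← hperm.countP_eq]
      congr 1
      funext i
      simp [Function.comp, Bool.and_comm]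
    rw [hccnt, hqcount] at hcnt
    have hfin : ((q.length : Int) -
        (PySem.List.bisectRight (PySem.List.sorted q (fun x => x)) (scores.headD []).sum : Int) + 1)
        = 1 + (scores.countP
            (fun i => !dominatedB scores i && decide ((scores.headD []).sum < i.sum)) : Int) := by
      omega
    exact hfin
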